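-- pv_equiv track=rewrite | github.com/sanjaykumaravel-max/sms_alert_system | src/ui/settings.py | _extract_machine_hint
-- ===== SOURCE A (Python) =====
-- def _extract_machine_hint(message: str) -> str:
--     raw = str(message or "").strip()
--     if not raw:
--         return "-"
--     prefixes = (
--         "CRITICAL ALERT:",
--         "OVERDUE ALERT:",
--         "DUE ALERT:",
--         "MAINTENANCE ALERT:",
--     )
--     for prefix in prefixes:
--         if raw.startswith(prefix):
--             remainder = raw[len(prefix):].strip()
--             return remainder.split(" ", 1)[0].split("(", 1)[0].strip() or "-"
--     return "-"
-- ===== SOURCE B (Python) =====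
-- def _extract_machine_hint(message: str) -> str:
--     raw = str(message or "").strip()
--     head, sep, tail = raw.partition(":")
--     if not sep or head not in {"CRITICAL ALERT", "OVERDUE ALERT", "DUE ALERT", "MAINTENANCE ALERT"}:
--         return "-"
--     return tail.strip().split(" ", 1)[0].split("(", 1)[0].strip() or "-"
-- ===== Notes on version B (the rewrite author's own statement) =====
-- stated objective: idiomatic
-- what changed: Replaces the loop over four alert prefixes with startswith and per-prefix slicing by a single partition at the first colon followed by a set-membership test of the head; the empty-input guard disappears because an empty string contains no colon.
import Mathlib
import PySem

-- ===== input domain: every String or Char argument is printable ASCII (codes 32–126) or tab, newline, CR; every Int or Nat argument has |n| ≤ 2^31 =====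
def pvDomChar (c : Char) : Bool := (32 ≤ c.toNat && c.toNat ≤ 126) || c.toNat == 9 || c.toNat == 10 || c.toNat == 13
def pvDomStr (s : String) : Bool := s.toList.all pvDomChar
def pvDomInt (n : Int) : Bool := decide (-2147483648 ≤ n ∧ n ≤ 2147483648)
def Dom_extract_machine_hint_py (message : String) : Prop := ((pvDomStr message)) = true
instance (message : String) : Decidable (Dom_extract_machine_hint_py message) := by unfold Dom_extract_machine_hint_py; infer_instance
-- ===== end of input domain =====

-- B replaces A's loop over the four alert prefixes (startswith + per-prefix slicing) by one
-- partition at the first colon plus a set-membership test of the head (idiomatic decomposition; same cost).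

-- shared tail pipeline: <stripped remainder>.split(" ", 1)[0].split("(", 1)[0].strip() or "-"
-- (this expression is identical in both Python versions)
def pvWordOf (s : String) : String :=
  let w := ((PySem.Str.splitMax? s " " 1).getD []).headD ""
  let w2 := ((PySem.Str.splitMax? w "(" 1).getD []).headD ""
  let out := PySem.Str.strip w2
  if out = "" then "-" else out

-- ===== PORT A =====
-- the 'for prefix in prefixes' loop with its early return
def pvLoopA (raw : String) : List String → String
  | [] => "-"
  | p :: ps =>
    if PySem.Str.startswith raw p then
      pvWordOf (PySem.Str.strip (PySem.Str.slice raw (some (PySem.Str.len p)) none))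
    else pvLoopA raw ps

def extract_machine_hint_py (message : String) : String :=
  let raw := PySem.Str.strip (if message = "" then "" else message)  -- str(message or "").strip()
  if raw = "" then "-"
  else pvLoopA raw ["CRITICAL ALERT:", "OVERDUE ALERT:", "DUE ALERT:", "MAINTENANCE ALERT:"]

-- ===== PORT B =====
def extract_machine_hint_py_alt (message : String) : String :=
  let raw := PySem.Str.strip (if message = "" then "" else message)  -- str(message or "").strip()
  -- raw.partition(":") ported by hand (PySem has no partition): split at the FIRST ':' found
  let i := PySem.Str.find raw ":"
  match (if i < 0 then (raw, "", "")
         else (PySem.Str.slice raw none (some i), ":", PySem.Str.slice raw (some (i + 1)) none)) with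
  | (head, sep, tail) =>
    if sep = "" then "-"
    else if head ∈ ["CRITICAL ALERT", "OVERDUE ALERT", "DUE ALERT", "MAINTENANCE ALERT"] then
      pvWordOf (PySem.Str.strip tail)
    else "-"

-- ===== PRECONDITION & SPEC =====
def Spec_extract_machine_hint_py (message : String) (out : String) : Prop := out = extract_machine_hint_py_alt message
instance (message : String) (out : String) : Decidable (Spec_extract_machine_hint_py message out) := by unfold Spec_extract_machine_hint_py; infer_instance

-- ===== CLAIM (what is proved, stated in full; the proofs are below) =====
def Claim_equal_extract_machine_hint_py : Prop := ∀ (message : String), Dom_extract_machine_hint_py message → Spec_extract_machine_hint_py message (extract_machine_hint_py message)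

-- ===== LEMMAS AND PROOFS =====

lemma pv_prefix_colon (p : List Char) (h : List Char) (t : List Char)
    (hh : (':' : Char) ∉ h) (hp : (':' : Char) ∉ p) :
    (p ++ [':'] <+: h ++ ':' :: t) ↔ p = h := by
  induction p generalizing h with
  | nil =>
    cases h with
    | nil => simp
    | cons c h' =>
      simp only [List.nil_append, List.cons_append, List.cons_prefix_cons]
      constructor
      · rintro ⟨rfl, -⟩; exact absurd (List.mem_cons_self ..) hh
      · intro hc; exact absurd hc (by simp)
  | cons c p' ih =>
    cases h with
    | nil =>
      simp only [List.cons_append, List.nil_append, List.cons_prefix_cons]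
      constructor
      · rintro ⟨rfl, -⟩; exact absurd (List.mem_cons_self ..) hp
      · intro hc; exact absurd hc (by simp)
    | cons d h' =>
      simp only [List.cons_append, List.cons_prefix_cons]
      rw [ih h' (fun hm => hh (List.mem_cons_of_mem _ hm)) (fun hm => hp (List.mem_cons_of_mem _ hm))]
      constructor
      · rintro ⟨rfl, rfl⟩; rfl
      · intro hc; cases hc; exact ⟨rfl, rfl⟩

lemma pv_sw (raw : String) (hc t : List Char) (hsplit : raw.toList = hc ++ ':' :: t)
    (hh : (':' : Char) ∉ hc) (pfull : String) (p : List Char) (hp : (':' : Char) ∉ p)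
    (hfull : pfull.toList = p ++ [':']) :
    PySem.Str.startswith raw pfull = decide (p = hc) := by
  simp only [PySem.Str.startswith_eq, hfull, hsplit]
  by_cases he : p = hc
  · subst he
    simp only [decide_true]
    exact (PySem.Chars.startswith_iff _ _).mpr ⟨t, by simp⟩
  · simp only [he, decide_false]
    rw [Bool.eq_false_iff]
    intro hb
    exact he ((pv_prefix_colon p hc t hh hp).mp ((PySem.Chars.startswith_iff _ _).mp hb))

set_option maxHeartbeats 2000000 in
lemma pv_core (raw : String) :
    (if raw = "" then "-"
     else pvLoopA raw ["CRITICAL ALERT:", "OVERDUE ALERT:", "DUE ALERT:", "MAINTENANCE ALERT:"]) =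
    (let i := PySem.Str.find raw ":"
     match (if i < 0 then (raw, "", "")
            else (PySem.Str.slice raw none (some i), ":", PySem.Str.slice raw (some (i + 1)) none)) with
     | (head, sep, tail) =>
       if sep = "" then "-"
       else if head ∈ ["CRITICAL ALERT", "OVERDUE ALERT", "DUE ALERT", "MAINTENANCE ALERT"] then
         pvWordOf (PySem.Str.strip tail)
       else "-") := by
  have hfc : PySem.Str.find raw ":" = PySem.Chars.find raw.toList [':'] := by simp
  by_cases hneg : PySem.Str.find raw ":" < 0
  · -- no colon anywhere in raw: both sides "-"
    have hfind : PySem.Chars.find raw.toList [':'] = -1 := by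
      have h1 := PySem.Chars.neg_one_le_find raw.toList [':']
      rw [hfc] at hneg; omega
    have hnotin : (':' : Char) ∉ raw.toList := by
      intro hm
      obtain ⟨s, t, hst⟩ := List.append_of_mem hm
      exact (PySem.Chars.find_eq_neg_one_iff _ _ |>.mp hfind) ⟨s, t, by rw [hst]; simp⟩
    have hsw : ∀ p : String, (':' : Char) ∈ p.toList → PySem.Str.startswith raw p = false := by
      intro p hp
      rw [PySem.Str.startswith_eq, Bool.eq_false_iff]
      intro hb
      exact hnotin (((PySem.Chars.startswith_iff _ _).mp hb).subset hp)
    simp only [if_pos hneg]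
    simp only [pvLoopA, hsw "CRITICAL ALERT:" (by decide), hsw "OVERDUE ALERT:" (by decide),
      hsw "DUE ALERT:" (by decide), hsw "MAINTENANCE ALERT:" (by decide)]
    simp
  · push_neg at hneg
    rw [hfc] at hneg
    obtain ⟨n, hfn⟩ : ∃ n : Nat, PySem.Chars.find raw.toList [':'] = (n : Int) :=
      ⟨_, (Int.toNat_of_nonneg hneg).symm⟩
    obtain ⟨hpre, hmin⟩ := PySem.Chars.find_spec (s := raw.toList) (sub := [':']) hneg
    rw [hfn] at hpre hmin
    simp only [Int.toNat_natCast] at hpre hmin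
    obtain ⟨t, ht⟩ := hpre
    have hd : raw.toList.drop n = ':' :: t := ht.symm
    have hnl : n < raw.toList.length := by
      by_contra hcon
      push_neg at hcon
      rw [List.drop_eq_nil_of_le hcon] at hd
      simp at hd
    have hsplit : raw.toList = raw.toList.take n ++ ':' :: t := by
      conv_lhs => rw [← List.take_append_drop n raw.toList]
      rw [hd]
    have hh : (':' : Char) ∉ raw.toList.take n := by
      intro hm
      obtain ⟨j, hj, hje⟩ := List.mem_iff_getElem.mp hm
      have hj' : j < n := by simpa using lt_of_lt_of_le hj (by simp)
      refine hmin j hj' ⟨raw.toList.drop (j + 1), ?_⟩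
      rw [List.getElem_take] at hje
      rw [← hje]
      exact (List.drop_eq_getElem_cons (by omega)).symm
    have hi : PySem.Str.find raw ":" = (n : Int) := hfc.trans hfn
    have hnneg : ¬ PySem.Str.find raw ":" < 0 := by rw [hi]; omega
    have hraw : raw ≠ "" := by
      intro h0
      rw [h0] at hnl
      simp at hnl
    have hng : n ≤ raw.toList.length := le_of_lt hnl
    have s1 := pv_sw raw (raw.toList.take n) t hsplit hh "CRITICAL ALERT:" ("CRITICAL ALERT".toList) (by decide) rfl
    have s2 := pv_sw raw (raw.toList.take n) t hsplit hh "OVERDUE ALERT:" ("OVERDUE ALERT".toList) (by decide) rfl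
    have s3 := pv_sw raw (raw.toList.take n) t hsplit hh "DUE ALERT:" ("DUE ALERT".toList) (by decide) rfl
    have s4 := pv_sw raw (raw.toList.take n) t hsplit hh "MAINTENANCE ALERT:" ("MAINTENANCE ALERT".toList) (by decide) rfl
    have hhd : (PySem.Str.slice raw none (some (PySem.Str.find raw ":"))).toList = raw.toList.take n := by
      rw [hi]
      simp [PySem.List.slice_to_natCast]
    simp only [if_neg hnneg, if_neg hraw]
    have hsepne : (":" : String) ≠ "" := by decide
    rw [if_neg hsepne]
    by_cases e1 : ("CRITICAL ALERT" : String).toList = raw.toList.take n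
    · have hb1 : PySem.Str.startswith raw "CRITICAL ALERT:" = true := by rw [s1, e1]; simp only [decide_eq_true_eq]
      have hn14 : n = (14 : Nat) := by
        have hlen := congrArg List.length e1
        have h14 : ("CRITICAL ALERT" : String).toList.length = 14 := by decide
        rw [h14, List.length_take] at hlen
        omega
      have hhdeq : PySem.Str.slice raw none (some (PySem.Str.find raw ":")) = "CRITICAL ALERT" := by
        apply String.toList_inj.mp
        rw [hhd, ← e1]
      simp only [pvLoopA, hb1, if_true, hhdeq, List.mem_cons]
      rw [if_pos (Or.inl trivial)]
      rw [show PySem.Str.len "CRITICAL ALERT:" = PySem.Str.find raw ":" + 1 from by rw [hi, hn14]; decide]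
    by_cases e2 : ("OVERDUE ALERT" : String).toList = raw.toList.take n
    · have hb2 : PySem.Str.startswith raw "OVERDUE ALERT:" = true := by rw [s2, e2]; simp only [decide_eq_true_eq]
      have hbf1 : PySem.Str.startswith raw "CRITICAL ALERT:" = false := by rw [s1]; exact decide_eq_false e1
      have hn2 : n = (13 : Nat) := by
        have hlen := congrArg List.length e2
        have hLit : ("OVERDUE ALERT" : String).toList.length = 13 := by decide
        rw [hLit, List.length_take] at hlen
        omega
      have hhdeq : PySem.Str.slice raw none (some (PySem.Str.find raw ":")) = "OVERDUE ALERT" := by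
        apply String.toList_inj.mp
        rw [hhd, ← e2]
      simp only [pvLoopA, hb2, hbf1, if_true, Bool.false_eq_true, if_false, hhdeq, List.mem_cons]
      rw [if_pos (Or.inr (Or.inl trivial))]
      rw [show PySem.Str.len "OVERDUE ALERT:" = PySem.Str.find raw ":" + 1 from by rw [hi, hn2]; decide]
    by_cases e3 : ("DUE ALERT" : String).toList = raw.toList.take n
    · have hb3 : PySem.Str.startswith raw "DUE ALERT:" = true := by rw [s3, e3]; simp only [decide_eq_true_eq]
      have hbf1 : PySem.Str.startswith raw "CRITICAL ALERT:" = false := by rw [s1]; exact decide_eq_false e1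
      have hbf2 : PySem.Str.startswith raw "OVERDUE ALERT:" = false := by rw [s2]; exact decide_eq_false e2
      have hn3 : n = (9 : Nat) := by
        have hlen := congrArg List.length e3
        have hLit : ("DUE ALERT" : String).toList.length = 9 := by decide
        rw [hLit, List.length_take] at hlen
        omega
      have hhdeq : PySem.Str.slice raw none (some (PySem.Str.find raw ":")) = "DUE ALERT" := by
        apply String.toList_inj.mp
        rw [hhd, ← e3]
      simp only [pvLoopA, hb3, hbf1, hbf2, if_true, Bool.false_eq_true, if_false, hhdeq, List.mem_cons]
      rw [if_pos (Or.inr (Or.inr (Or.inl trivial)))]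
      rw [show PySem.Str.len "DUE ALERT:" = PySem.Str.find raw ":" + 1 from by rw [hi, hn3]; decide]
    by_cases e4 : ("MAINTENANCE ALERT" : String).toList = raw.toList.take n
    · have hb4 : PySem.Str.startswith raw "MAINTENANCE ALERT:" = true := by rw [s4, e4]; simp only [decide_eq_true_eq]
      have hbf1 : PySem.Str.startswith raw "CRITICAL ALERT:" = false := by rw [s1]; exact decide_eq_false e1
      have hbf2 : PySem.Str.startswith raw "OVERDUE ALERT:" = false := by rw [s2]; exact decide_eq_false e2
      have hbf3 : PySem.Str.startswith raw "DUE ALERT:" = false := by rw [s3]; exact decide_eq_false e3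
      have hn4 : n = (17 : Nat) := by
        have hlen := congrArg List.length e4
        have hLit : ("MAINTENANCE ALERT" : String).toList.length = 17 := by decide
        rw [hLit, List.length_take] at hlen
        omega
      have hhdeq : PySem.Str.slice raw none (some (PySem.Str.find raw ":")) = "MAINTENANCE ALERT" := by
        apply String.toList_inj.mp
        rw [hhd, ← e4]
      simp only [pvLoopA, hb4, hbf1, hbf2, hbf3, if_true, Bool.false_eq_true, if_false, hhdeq, List.mem_cons]
      rw [if_pos (Or.inr (Or.inr (Or.inr (Or.inl trivial))))]
      rw [show PySem.Str.len "MAINTENANCE ALERT:" = PySem.Str.find raw ":" + 1 from by rw [hi, hn4]; decide]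
    ·
      have hbf1 : PySem.Str.startswith raw "CRITICAL ALERT:" = false := by rw [s1]; exact decide_eq_false e1
      have hbf2 : PySem.Str.startswith raw "OVERDUE ALERT:" = false := by rw [s2]; exact decide_eq_false e2
      have hbf3 : PySem.Str.startswith raw "DUE ALERT:" = false := by rw [s3]; exact decide_eq_false e3
      have hbf4 : PySem.Str.startswith raw "MAINTENANCE ALERT:" = false := by rw [s4]; exact decide_eq_false e4
      have hnm : PySem.Str.slice raw none (some (PySem.Str.find raw ":")) ∉ (["CRITICAL ALERT", "OVERDUE ALERT", "DUE ALERT", "MAINTENANCE ALERT"] : List String) := by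
        intro hmem
        simp only [List.mem_cons, List.not_mem_nil, or_false] at hmem
        rcases hmem with h | h | h | h
        · exact e1 (by rw [← hhd, h])
        · exact e2 (by rw [← hhd, h])
        · exact e3 (by rw [← hhd, h])
        · exact e4 (by rw [← hhd, h])
      simp only [pvLoopA, hbf1, hbf2, hbf3, hbf4, Bool.false_eq_true, if_false]
      rw [if_neg hnm]

-- ===== VERDICT (by name: the statement is the Claim_ definition above) =====
theorem extract_machine_hint_py_spec : Claim_equal_extract_machine_hint_py := by
  intro message _
  unfold Spec_extract_machine_hint_py extract_machine_hint_py extract_machine_hint_py_alt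
  exact pv_core _
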